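-- pv_equiv track=rewrite | github.com/sowmivenkat06/taxiridefareestimator | api/fare_calculator.py | calculate_future_time_of_day
-- ===== SOURCE A (Python) =====
-- def calculate_future_time_of_day(current_time, minutes_offset):
--     """Calculate future time of day based on minutes offset."""
--     # Define time periods and their rough hour ranges
--     time_periods = {
--         'early_morning': (5, 7),   # 5-7 AM
--         'morning_rush': (7, 9),    # 7-9 AM
--         'day': (9, 16),            # 9 AM-4 PM
--         'evening_rush': (16, 19),  # 4-7 PM
--         'evening': (19, 22),       # 7-10 PM
--         'night': (22, 5)           # 10 PM-5 AM (wrapping around midnight)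
--     }
--
--     # Get the current hour range
--     current_period = time_periods.get(current_time, (12, 13))  # Default to mid-day if invalid
--
--     # Handle night period which wraps around midnight
--     if current_time == 'night':
--         current_hour = 23  # Assume middle of night period
--     else:
--         current_hour = (current_period[0] + current_period[1]) // 2  # Middle of the period
--
--     # Calculate future hour
--     future_hour = (current_hour + (minutes_offset // 60)) % 24
--
--     # Determine future time period
--     for period, (start, end) in time_periods.items():
--         if period == 'night':  # Special handling for night which wraps around
--             if future_hour >= 22 or future_hour < 5:
--                 return period
--         elif start <= future_hour < end:
--             return period
--
--     return 'day'  # Default fallback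
-- ===== SOURCE B (Python) =====
-- _PERIOD_HOUR = {'early_morning': 6, 'morning_rush': 8, 'day': 12,
--                 'evening_rush': 17, 'evening': 20, 'night': 23}
--
-- _HOUR_TO_PERIOD = (['night'] * 5 + ['early_morning'] * 2 + ['morning_rush'] * 2
--                    + ['day'] * 7 + ['evening_rush'] * 3 + ['evening'] * 3
--                    + ['night'] * 2)
--
-- def calculate_future_time_of_day(current_time, minutes_offset):
--     """Calculate future time of day based on minutes offset."""
--     current_hour = _PERIOD_HOUR.get(current_time, 12)
--     future_hour = (current_hour + minutes_offset // 60) % 24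
--     return _HOUR_TO_PERIOD[future_hour]
-- ===== Notes on version B (the rewrite author's own statement) =====
-- stated objective: idiomatic
-- what changed: Replaces the range-pair dict plus midpoint arithmetic and the boundary-scanning loop with a precomputed period->representative-hour dict and a 24-entry hour->period table indexed directly.
import Mathlib
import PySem

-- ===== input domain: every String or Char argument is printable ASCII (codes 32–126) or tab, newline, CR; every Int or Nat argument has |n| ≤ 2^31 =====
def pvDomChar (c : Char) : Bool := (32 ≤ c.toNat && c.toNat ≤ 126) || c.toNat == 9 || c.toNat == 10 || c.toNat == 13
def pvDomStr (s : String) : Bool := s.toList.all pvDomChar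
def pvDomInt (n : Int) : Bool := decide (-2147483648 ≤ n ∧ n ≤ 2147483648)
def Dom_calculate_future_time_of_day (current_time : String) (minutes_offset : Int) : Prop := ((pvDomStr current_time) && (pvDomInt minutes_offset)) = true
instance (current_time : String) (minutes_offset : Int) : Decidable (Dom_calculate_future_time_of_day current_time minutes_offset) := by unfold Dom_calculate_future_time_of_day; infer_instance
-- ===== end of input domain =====

-- B replaces the range-pair dict, midpoint arithmetic and the boundary-scanning loop by a
-- representative-hour dict and a precomputed 24-entry hour->period table read by direct index (idiomatic).

-- ===== PORT A =====
def pvPeriodsA : PySem.Dict String (Int × Int) :=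
  PySem.Dict.mk [("early_morning", (5, 7)), ("morning_rush", (7, 9)), ("day", (9, 16)),
                 ("evening_rush", (16, 19)), ("evening", (19, 22)), ("night", (22, 5))]

-- the 'for period, (start, end) in time_periods.items()' loop with its early returns
def pvScanA : List (String × (Int × Int)) → Int → String
  | [], _ => "day"
  | (p, se) :: rest, fh =>
    if p = "night" then
      if 22 ≤ fh ∨ fh < 5 then p else pvScanA rest fh
    else if se.1 ≤ fh ∧ fh < se.2 then p else pvScanA rest fh

def calculate_future_time_of_day (current_time : String) (minutes_offset : Int) : String :=
  let current_period := PySem.Dict.getD pvPeriodsA current_time (12, 13)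
  let current_hour : Int :=
    if current_time = "night" then 23
    else PySem.Int.floordiv (current_period.1 + current_period.2) 2
  let future_hour := PySem.Int.mod (current_hour + PySem.Int.floordiv minutes_offset 60) 24
  pvScanA pvPeriodsA.items future_hour

-- ===== PORT B =====
def pvPeriodHourB : PySem.Dict String Int :=
  PySem.Dict.mk [("early_morning", 6), ("morning_rush", 8), ("day", 12),
                 ("evening_rush", 17), ("evening", 20), ("night", 23)]

def pvHourToPeriodB : List String :=
  List.replicate 5 "night" ++ List.replicate 2 "early_morning" ++ List.replicate 2 "morning_rush" ++
  List.replicate 7 "day" ++ List.replicate 3 "evening_rush" ++ List.replicate 3 "evening" ++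
  List.replicate 2 "night"

def calculate_future_time_of_day_alt (current_time : String) (minutes_offset : Int) : String :=
  let current_hour := PySem.Dict.getD pvPeriodHourB current_time 12
  let future_hour := PySem.Int.mod (current_hour + PySem.Int.floordiv minutes_offset 60) 24
  -- direct index; future_hour is always in range, (·.getD "") only makes the lookup total
  (PySem.List.pyGet? pvHourToPeriodB future_hour).getD ""

-- ===== PRECONDITION & SPEC =====
def Spec_calculate_future_time_of_day (current_time : String) (minutes_offset : Int) (out : String) : Prop := out = calculate_future_time_of_day_alt current_time minutes_offset
instance (current_time : String) (minutes_offset : Int) (out : String) : Decidable (Spec_calculate_future_time_of_day current_time minutes_offset out) := by unfold Spec_calculate_future_time_of_day; infer_instance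

-- ===== CLAIM (what is proved, stated in full; the proofs are below) =====
def Claim_equal_calculate_future_time_of_day : Prop := ∀ (current_time : String) (minutes_offset : Int), Dom_calculate_future_time_of_day current_time minutes_offset → Spec_calculate_future_time_of_day current_time minutes_offset (calculate_future_time_of_day current_time minutes_offset)

-- ===== LEMMAS AND PROOFS =====

-- the representative hour A computes equals B's dict lookup, for every string
theorem pv_hour_eq (ct : String) :
    (if ct = "night" then (23 : Int)
     else PySem.Int.floordiv ((PySem.Dict.getD pvPeriodsA ct (12, 13)).1 +
                              (PySem.Dict.getD pvPeriodsA ct (12, 13)).2) 2) =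
    PySem.Dict.getD pvPeriodHourB ct 12 := by
  rcases eq_or_ne ct "night" with h | h; · subst h; decide
  rcases eq_or_ne ct "early_morning" with h1 | h1; · subst h1; decide
  rcases eq_or_ne ct "morning_rush" with h2 | h2; · subst h2; decide
  rcases eq_or_ne ct "day" with h3 | h3; · subst h3; decide
  rcases eq_or_ne ct "evening_rush" with h4 | h4; · subst h4; decide
  rcases eq_or_ne ct "evening" with h5 | h5; · subst h5; decide
  simp [pvPeriodsA, pvPeriodHourB, PySem.Dict.getD, PySem.Dict.get?, beq_iff_eq,
        Ne.symm h, Ne.symm h1, Ne.symm h2, Ne.symm h3, Ne.symm h4, Ne.symm h5, h]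

-- A's boundary scan agrees with B's table on every hour 0..23
theorem pv_scan_eq_fin : ∀ n : Fin 24,
    pvScanA pvPeriodsA.items (n : Int) = (PySem.List.pyGet? pvHourToPeriodB (n : Int)).getD "" := by
  decide

theorem pv_scan_eq (h : Int) (h0 : 0 ≤ h) (h24 : h < 24) :
    pvScanA pvPeriodsA.items h = (PySem.List.pyGet? pvHourToPeriodB h).getD "" := by
  have hn : h = ((⟨h.toNat, by omega⟩ : Fin 24) : Int) := by simp; omega
  rw [hn]; exact pv_scan_eq_fin _

-- ===== VERDICT (by name: the statement is the Claim_ definition above) =====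
theorem calculate_future_time_of_day_spec : Claim_equal_calculate_future_time_of_day := by
  intro ct m _
  show calculate_future_time_of_day ct m = _
  simp only [calculate_future_time_of_day, calculate_future_time_of_day_alt]
  rw [pv_hour_eq ct]
  exact pv_scan_eq _ (PySem.Int.mod_nonneg _ (by norm_num)) (PySem.Int.mod_lt _ (by norm_num))
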